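-- pv_equiv track=rewrite | github.com/JonathanHaudenschild/SCC_Schichtplan_Algorithmus | simulatedAnnealing_ref.py | shift_category_com_cost
-- ===== SOURCE A (Python) =====
-- SHIFT_CATEGORY_FACTOR = 1
--
-- def shift_category_com_cost(
--     solution,
--     shift_category_array,
--     pref_shift_category_array,
--     shift_category_factor=SHIFT_CATEGORY_FACTOR,
-- ):
--     num_people = len(pref_shift_category_array)
--     individual_costs = [0] * num_people
--
--     # Count the number of mismatches for each person
--     mismatches = [0] * num_people
--     for shift_index, shift in enumerate(solution):
--         for person in shift:
--             if shift_category_array[shift_index] != pref_shift_category_array[person]: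
--                 if shift_category_array[shift_index] > 0:
--                     mismatches[person] += 1
--
--     # Calculate the cost based on the number of mismatches
--     for person in range(num_people):
--         if mismatches[person] > 0:
--             individual_costs[person] = shift_category_factor * (
--                 2 ** (mismatches[person] - 1)
--             )  # Exponential increase
--
--     return individual_costs
-- ===== SOURCE B (Python) =====
-- SHIFT_CATEGORY_FACTOR = 1
--
-- def shift_category_com_cost(
--     solution,
--     shift_category_array,
--     pref_shift_category_array,
--     shift_category_factor=SHIFT_CATEGORY_FACTOR,
-- ):
--     # Single pass: no mismatches array, no second loop. The first qualifying
--     # hit for a person sets the factor; each later hit doubles it, which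
--     # yields factor * 2**(hits - 1) directly.
--     individual_costs = [0] * len(pref_shift_category_array)
--     for shift_index, shift in enumerate(solution):
--         for person in shift:
--             if (shift_category_array[shift_index] != pref_shift_category_array[person]
--                     and shift_category_array[shift_index] > 0):
--                 if individual_costs[person] == 0:
--                     individual_costs[person] = shift_category_factor
--                 else:
--                     individual_costs[person] *= 2
--     return individual_costs
-- ===== Notes on version B (the rewrite author's own statement) =====
-- stated objective: simpler
-- what changed: B folds A's two phases (count mismatches into an intermediate array, then exponentiate in a second loop) into one pass that maintains the cost list directly: the first qualifying hit for a person writes the factor and each later hit doubles it, so the mismatches array and the range loop disappear.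
import Mathlib
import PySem

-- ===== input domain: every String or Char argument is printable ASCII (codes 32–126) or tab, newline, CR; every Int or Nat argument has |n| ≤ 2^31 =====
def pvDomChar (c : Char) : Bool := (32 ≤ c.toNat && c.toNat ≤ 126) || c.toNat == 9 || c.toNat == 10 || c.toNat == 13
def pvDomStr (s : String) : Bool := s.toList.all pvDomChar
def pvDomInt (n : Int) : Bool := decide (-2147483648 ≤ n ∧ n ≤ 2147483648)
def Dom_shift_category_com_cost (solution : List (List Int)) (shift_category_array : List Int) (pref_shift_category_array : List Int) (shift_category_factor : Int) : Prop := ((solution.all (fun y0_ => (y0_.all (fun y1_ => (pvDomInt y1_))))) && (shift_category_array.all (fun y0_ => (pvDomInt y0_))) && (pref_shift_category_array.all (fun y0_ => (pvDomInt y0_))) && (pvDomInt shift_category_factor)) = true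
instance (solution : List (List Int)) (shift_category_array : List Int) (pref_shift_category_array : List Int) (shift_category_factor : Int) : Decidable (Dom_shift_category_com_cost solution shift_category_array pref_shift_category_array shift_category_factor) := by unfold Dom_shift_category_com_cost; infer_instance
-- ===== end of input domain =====

-- B folds A's two phases (count mismatches, then exponentiate) into one pass that maintains
-- the cost directly (first qualifying hit writes the factor, later hits double it); objective: simpler.

-- ===== PORT A =====
-- A's inner-loop body: one `person` of one shift updating the mismatches list
def pvA_inner (shift_category_array pref_shift_category_array : List Int) (si : Int)
    (mm : List Int) (person : Int) : List Int :=
  if PySem.List.pyGetD shift_category_array si 0 ≠ PySem.List.pyGetD pref_shift_category_array person 0 then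
    if PySem.List.pyGetD shift_category_array si 0 > 0 then
      PySem.List.pySetD mm person (PySem.List.pyGetD mm person 0 + 1)
    else mm
  else mm

def shift_category_com_cost (solution : List (List Int)) (shift_category_array : List Int) (pref_shift_category_array : List Int) (shift_category_factor : Int) : List Int :=
  let num_people : Nat := pref_shift_category_array.length
  let mismatches : List Int :=
    (PySem.List.enumerate solution).foldl
      (fun mm p => p.2.foldl (pvA_inner shift_category_array pref_shift_category_array p.1) mm)
      (List.replicate num_people 0)
  (PySem.List.pyRange 0 (num_people : Int) 1).foldl
    (fun ic person =>
      if PySem.List.pyGetD mismatches person 0 > 0 then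
        PySem.List.pySetD ic person
          (shift_category_factor * 2 ^ (PySem.List.pyGetD mismatches person 0 - 1).toNat)
      else ic)
    (List.replicate num_people 0)

-- ===== PORT B =====
-- B's inner-loop body: one `person` of one shift updating the cost list in place
def pvB_inner (shift_category_array pref_shift_category_array : List Int) (shift_category_factor : Int)
    (si : Int) (ic : List Int) (person : Int) : List Int :=
  if PySem.List.pyGetD shift_category_array si 0 ≠ PySem.List.pyGetD pref_shift_category_array person 0
      ∧ PySem.List.pyGetD shift_category_array si 0 > 0 then
    if PySem.List.pyGetD ic person 0 = 0 then
      PySem.List.pySetD ic person shift_category_factor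
    else
      PySem.List.pySetD ic person (PySem.List.pyGetD ic person 0 * 2)
  else ic

def shift_category_com_cost_alt (solution : List (List Int)) (shift_category_array : List Int) (pref_shift_category_array : List Int) (shift_category_factor : Int) : List Int :=
  (PySem.List.enumerate solution).foldl
    (fun ic p => p.2.foldl (pvB_inner shift_category_array pref_shift_category_array shift_category_factor p.1) ic)
    (List.replicate pref_shift_category_array.length 0)

-- ===== PRECONDITION & SPEC =====
-- Pre_ excludes exactly the inputs where A raises IndexError: a nonempty shift whose index is
-- past the end of shift_category_array, or a person outside [-len(pref), len(pref)).
def Pre_shift_category_com_cost (solution : List (List Int)) (shift_category_array : List Int) (pref_shift_category_array : List Int) (shift_category_factor : Int) : Prop :=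
  ∀ i < solution.length,
    (solution.getD i [] ≠ [] → i < shift_category_array.length) ∧
    ∀ q ∈ solution.getD i [], PySem.Raise.InRange pref_shift_category_array.length q
instance (solution : List (List Int)) (shift_category_array : List Int) (pref_shift_category_array : List Int) (shift_category_factor : Int) : Decidable (Pre_shift_category_com_cost solution shift_category_array pref_shift_category_array shift_category_factor) := by unfold Pre_shift_category_com_cost; infer_instance

def pvWitness_shift_category_com_cost : List (List Int) × List Int × List Int × Int :=
  ([[0], [0, 1]], [1, 2], [1, 2], 3)

def Spec_shift_category_com_cost (solution : List (List Int)) (shift_category_array : List Int) (pref_shift_category_array : List Int) (shift_category_factor : Int) (out : List Int) : Prop := out = shift_category_com_cost_alt solution shift_category_array pref_shift_category_array shift_category_factor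
instance (solution : List (List Int)) (shift_category_array : List Int) (pref_shift_category_array : List Int) (shift_category_factor : Int) (out : List Int) : Decidable (Spec_shift_category_com_cost solution shift_category_array pref_shift_category_array shift_category_factor out) := by unfold Spec_shift_category_com_cost; infer_instance

-- ===== CLAIM (what is proved, stated in full; the proofs are below) =====
def Claim_equal_shift_category_com_cost : Prop := ∀ (solution : List (List Int)) (shift_category_array : List Int) (pref_shift_category_array : List Int) (shift_category_factor : Int), Dom_shift_category_com_cost solution shift_category_array pref_shift_category_array shift_category_factor → Pre_shift_category_com_cost solution shift_category_array pref_shift_category_array shift_category_factor → Spec_shift_category_com_cost solution shift_category_array pref_shift_category_array shift_category_factor (shift_category_com_cost solution shift_category_array pref_shift_category_array shift_category_factor)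

-- ===== LEMMAS AND PROOFS =====

-- the cost A assigns to a final mismatch count m
def costOf (factor m : Int) : Int := if 0 < m then factor * 2 ^ (m - 1).toNat else 0

theorem pvIdx_resolve {n : Nat} {i : Int} (h : PySem.Raise.InRange n i) :
    ∃ j : Nat, j < n ∧ PySem.List.pyIdx? n i = some j := by
  obtain ⟨h1, h2⟩ := h
  unfold PySem.List.pyIdx?
  by_cases ha : 0 ≤ i
  · rw [if_pos ha, if_pos h2]
    exact ⟨i.toNat, by omega, rfl⟩
  · rw [if_neg ha, if_pos h1]
    exact ⟨n - (-i).toNat, by omega, rfl⟩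

theorem pvGetD_resolve {α : Type} (xs : List α) (i : Int) (d : α) {j : Nat}
    (hj : j < xs.length) (hidx : PySem.List.pyIdx? xs.length i = some j) :
    PySem.List.pyGetD xs i d = xs.getD j d := by
  simp [PySem.List.pyGetD, PySem.List.pyGet?, hidx, List.getD, List.getElem?_eq_getElem hj]

theorem pvSetD_resolve {α : Type} (xs : List α) (i : Int) (v : α) {j : Nat}
    (hidx : PySem.List.pyIdx? xs.length i = some j) :
    PySem.List.pySetD xs i v = xs.set j v := by
  simp [PySem.List.pySetD, PySem.List.pySet?, hidx]

-- the crux: one qualifying update preserves "cost list = map costOf over mismatch list"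
theorem pvStep_eq (factor : Int) (mm : List Int) (j : Nat) (hj : j < mm.length)
    (hpos : ∀ x ∈ mm, 0 ≤ x) :
    (if (mm.map (costOf factor)).getD j 0 = 0
       then (mm.map (costOf factor)).set j factor
       else (mm.map (costOf factor)).set j ((mm.map (costOf factor)).getD j 0 * 2))
    = (mm.set j (mm.getD j 0 + 1)).map (costOf factor) := by
  have hm : 0 ≤ mm[j] := hpos _ (List.getElem_mem hj)
  have hget : (mm.map (costOf factor)).getD j 0 = costOf factor mm[j] := by
    simp [List.getD, List.getElem?_eq_getElem, hj]
  have hgetmm : mm.getD j 0 = mm[j] := by simp [List.getD, List.getElem?_eq_getElem, hj]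
  rw [hget, hgetmm, List.map_set]
  rcases eq_or_lt_of_le hm with h0 | hgt
  · -- mm[j] = 0 : cost was 0, B writes the factor, A's count becomes 1
    simp [costOf, ← h0]
  · -- mm[j] > 0
    have hcost : costOf factor mm[j] = factor * 2 ^ (mm[j] - 1).toNat := by
      simp [costOf, hgt]
    have hcost' : costOf factor (mm[j] + 1) = factor * 2 ^ ((mm[j] - 1).toNat + 1) := by
      have h1 : (mm[j] + 1 - 1).toNat = (mm[j] - 1).toNat + 1 := by omega
      unfold costOf
      rw [if_pos (show (0:Int) < mm[j] + 1 by omega), h1]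
    by_cases hf : factor = 0
    · subst hf
      simp [hcost, hcost']
    · have hne : factor * 2 ^ (mm[j] - 1).toNat ≠ 0 := by positivity
      rw [hcost, hcost', if_neg hne]
      congr 1
      ring

-- one person-step of the two inner loops preserves the relation
theorem pvPerson_eq (sca pref : List Int) (factor si : Int) (mm : List Int) (q : Int)
    (hlen : mm.length = pref.length) (hpos : ∀ x ∈ mm, 0 ≤ x)
    (hq : PySem.Raise.InRange pref.length q) :
    pvB_inner sca pref factor si (mm.map (costOf factor)) q
      = (pvA_inner sca pref si mm q).map (costOf factor) := by
  obtain ⟨j, hj, hidx⟩ := pvIdx_resolve (n := mm.length) (i := q) (by rw [hlen]; exact hq)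
  have hidx' : PySem.List.pyIdx? (mm.map (costOf factor)).length q = some j := by
    simpa using hidx
  unfold pvA_inner pvB_inner
  by_cases hne : PySem.List.pyGetD sca si 0 ≠ PySem.List.pyGetD pref q 0
  · by_cases hgt : PySem.List.pyGetD sca si 0 > 0
    · rw [if_pos ⟨hne, hgt⟩, if_pos hne, if_pos hgt]
      rw [pvGetD_resolve _ _ _ (by simpa using hj) hidx',
          pvSetD_resolve _ _ _ hidx', pvSetD_resolve _ _ _ hidx',
          pvSetD_resolve _ _ _ hidx, pvGetD_resolve _ _ _ hj hidx]
      exact pvStep_eq factor mm j hj hpos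
    · rw [if_neg (by tauto), if_pos hne, if_neg hgt]
  · rw [if_neg (by tauto), if_neg hne]

theorem pvGetD_nonneg (mm : List Int) (q : Int) (hpos : ∀ x ∈ mm, 0 ≤ x) :
    0 ≤ PySem.List.pyGetD mm q 0 := by
  unfold PySem.List.pyGetD PySem.List.pyGet?
  cases h : PySem.List.pyIdx? mm.length q with
  | none => simp
  | some j =>
    cases hj : mm[j]? with
    | none => simp [hj]
    | some a =>
      simp only [h, Option.bind_some, hj, Option.getD_some]
      exact hpos a (List.mem_of_getElem? hj)

-- A's mismatch state stays the right length and nonnegative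
theorem pvA_inner_inv (sca pref : List Int) (si : Int) (mm : List Int) (q : Int)
    (hlen : mm.length = pref.length) (hpos : ∀ x ∈ mm, 0 ≤ x) :
    (pvA_inner sca pref si mm q).length = pref.length ∧
      ∀ x ∈ pvA_inner sca pref si mm q, 0 ≤ x := by
  unfold pvA_inner
  split_ifs with h1 h2
  · constructor
    · unfold PySem.List.pySetD PySem.List.pySet?
      cases hidx : PySem.List.pyIdx? mm.length q with
      | none => simpa using hlen
      | some j => simpa using hlen
    · intro x hx
      unfold PySem.List.pySetD PySem.List.pySet? at hx
      cases hidx : PySem.List.pyIdx? mm.length q with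
      | none => rw [hidx] at hx; simp at hx; exact hpos x hx
      | some j =>
        rw [hidx] at hx; simp at hx
        rcases List.mem_or_eq_of_mem_set hx with h | h
        · exact hpos x h
        · subst h
          have := pvGetD_nonneg mm q hpos
          omega
  · exact ⟨hlen, hpos⟩
  · exact ⟨hlen, hpos⟩

-- inner loop over one shift
theorem pvShift_eq (sca pref : List Int) (factor si : Int) :
    ∀ (shift mm : List Int), mm.length = pref.length → (∀ x ∈ mm, 0 ≤ x) →
      (∀ q ∈ shift, PySem.Raise.InRange pref.length q) →
      shift.foldl (pvB_inner sca pref factor si) (mm.map (costOf factor))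
          = (shift.foldl (pvA_inner sca pref si) mm).map (costOf factor)
        ∧ (shift.foldl (pvA_inner sca pref si) mm).length = pref.length
        ∧ ∀ x ∈ shift.foldl (pvA_inner sca pref si) mm, 0 ≤ x := by
  intro shift
  induction shift with
  | nil => intro mm h1 h2 _; exact ⟨rfl, h1, h2⟩
  | cons q rest ih =>
    intro mm h1 h2 h3
    have hq := h3 q (List.mem_cons_self ..)
    have hinv := pvA_inner_inv sca pref si mm q h1 h2
    simp only [List.foldl_cons]
    rw [pvPerson_eq sca pref factor si mm q h1 h2 hq]
    exact ih (pvA_inner sca pref si mm q) hinv.1 hinv.2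
      (fun r hr => h3 r (List.mem_cons_of_mem _ hr))

-- outer loop over enumerate(solution)
theorem pvOuter_eq (sca pref : List Int) (factor : Int) :
    ∀ (sol : List (List Int)) (start : Int) (mm : List Int),
      mm.length = pref.length → (∀ x ∈ mm, 0 ≤ x) →
      (∀ s ∈ sol, ∀ q ∈ s, PySem.Raise.InRange pref.length q) →
      (PySem.List.enumerate sol start).foldl
          (fun ic p => p.2.foldl (pvB_inner sca pref factor p.1) ic) (mm.map (costOf factor))
        = ((PySem.List.enumerate sol start).foldl
            (fun m p => p.2.foldl (pvA_inner sca pref p.1) m) mm).map (costOf factor)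
      ∧ ((PySem.List.enumerate sol start).foldl
            (fun m p => p.2.foldl (pvA_inner sca pref p.1) m) mm).length = pref.length
      ∧ ∀ x ∈ (PySem.List.enumerate sol start).foldl
            (fun m p => p.2.foldl (pvA_inner sca pref p.1) m) mm, 0 ≤ x := by
  intro sol
  induction sol with
  | nil => intro start mm h1 h2 _; simp [PySem.List.enumerate]; exact ⟨h1, h2⟩
  | cons s rest ih =>
    intro start mm h1 h2 h3
    rw [PySem.List.enumerate_cons]
    simp only [List.foldl_cons]
    have hs := pvShift_eq sca pref factor start s mm h1 h2 (h3 s (List.mem_cons_self ..))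
    rw [hs.1]
    exact ih (start + 1) _ hs.2.1 hs.2.2 (fun t ht => h3 t (List.mem_cons_of_mem _ ht))

-- A's second loop turns the mismatch list into the mapped cost list
theorem pvSecond_loop (factor : Int) (mm : List Int) (hpos : ∀ x ∈ mm, 0 ≤ x) :
    (PySem.List.pyRange 0 (mm.length : Int) 1).foldl
      (fun ic person =>
        if PySem.List.pyGetD mm person 0 > 0 then
          PySem.List.pySetD ic person (factor * 2 ^ (PySem.List.pyGetD mm person 0 - 1).toNat)
        else ic)
      (List.replicate mm.length 0) = mm.map (costOf factor) := by
  have aux : ∀ k : Nat, k ≤ mm.length →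
      (PySem.List.pyRange 0 (k : Int) 1).foldl
        (fun ic person =>
          if PySem.List.pyGetD mm person 0 > 0 then
            PySem.List.pySetD ic person (factor * 2 ^ (PySem.List.pyGetD mm person 0 - 1).toNat)
          else ic)
        (List.replicate mm.length 0)
        = (mm.map (costOf factor)).take k ++ List.replicate (mm.length - k) 0 := by
    intro k
    induction k with
    | zero => intro _; simp [PySem.List.pyRange_one_eq_nil]
    | succ k ih =>
      intro hk1
      have hk : k < mm.length := by omega
      have hsplit : PySem.List.pyRange 0 ((k + 1 : Nat) : Int) 1
          = PySem.List.pyRange 0 (k : Nat) 1 ++ [(k : Int)] := by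
        have := PySem.List.pyRange_one_succ_right (a := 0) (b := (k : Int))
          (by exact_mod_cast Nat.zero_le k)
        push_cast
        push_cast at this
        exact this
      rw [hsplit, List.foldl_append, ih (by omega)]
      have hget : PySem.List.pyGetD mm (k : Int) 0 = mm[k] := by
        simp [List.getD, List.getElem?_eq_getElem hk]
      have hlen1 : ((mm.map (costOf factor)).take k).length = k := by
        simp [List.length_take, Nat.min_eq_left (le_of_lt hk)]
      have hrep : List.replicate (mm.length - k) (0 : Int)
          = 0 :: List.replicate (mm.length - (k + 1)) 0 := by
        have : mm.length - k = (mm.length - (k + 1)) + 1 := by omega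
        rw [this, List.replicate_succ]
      have htake : (mm.map (costOf factor)).take (k + 1)
          = (mm.map (costOf factor)).take k ++ [costOf factor mm[k]] := by
        rw [List.take_succ]
        have : (mm.map (costOf factor))[k]? = some (costOf factor mm[k]) := by
          simp [List.getElem?_eq_getElem, hk]
        simp [this]
      have hpos' : 0 ≤ mm[k] := hpos _ (List.getElem_mem hk)
      simp only [List.foldl_cons, List.foldl_nil, hget]
      by_cases hgt : mm[k] > 0
      · rw [if_pos hgt]
        have hset : PySem.List.pySetD
            ((mm.map (costOf factor)).take k ++ List.replicate (mm.length - k) 0)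
            (k : Int) (factor * 2 ^ (mm[k] - 1).toNat)
            = ((mm.map (costOf factor)).take k ++ List.replicate (mm.length - k) 0).set k
                (factor * 2 ^ (mm[k] - 1).toNat) := by
          simp
        rw [hset, hrep, List.set_append_right _ _ (by rw [hlen1]), hlen1]
        simp only [Nat.sub_self, List.set_cons_zero]
        rw [htake]
        have : costOf factor mm[k] = factor * 2 ^ (mm[k] - 1).toNat := by
          simp [costOf, hgt]
        rw [this, List.append_assoc]
        rfl
      · rw [if_neg hgt]
        have h0 : mm[k] = 0 := by omega
        rw [htake, hrep]
        have : costOf factor mm[k] = 0 := by simp [costOf, h0]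
        rw [this, List.append_assoc]
        rfl
  have h := aux mm.length (le_refl _)
  rw [Nat.sub_self, List.replicate_zero, List.append_nil,
      List.take_of_length_le (by simp)] at h
  exact h

-- ===== VERDICT (by name: the statement is the Claim_ definition above) =====
theorem shift_category_com_cost_spec : Claim_equal_shift_category_com_cost := by
  intro solution sca pref factor _ hpre
  unfold Spec_shift_category_com_cost
  unfold shift_category_com_cost shift_category_com_cost_alt
  have hmem : ∀ s ∈ solution, ∀ q ∈ s, PySem.Raise.InRange pref.length q := by
    intro s hs q hq
    obtain ⟨i, hi, rfl⟩ := List.mem_iff_getElem.mp hs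
    have := (hpre i hi).2
    simp only [List.getD, List.getElem?_eq_getElem hi, Option.getD_some] at this
    exact this q hq
  have h := pvOuter_eq sca pref factor solution 0 (List.replicate pref.length 0)
    (by simp) (by intro x hx; simp [List.eq_of_mem_replicate hx]) hmem
  rw [show (List.replicate pref.length (0:Int)).map (costOf factor)
        = List.replicate pref.length 0 by simp [costOf]] at h
  rw [h.1]
  have := pvSecond_loop factor
    ((PySem.List.enumerate solution).foldl (fun m p => p.2.foldl (pvA_inner sca pref p.1) m)
      (List.replicate pref.length 0)) h.2.2
  rw [h.2.1] at this
  exact this
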